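-- pv_equiv track=rewrite | github.com/NadiyaSitdykova/RosalindProblems | MaximazingGapSymbols.py | maximazing_gap_symbols
-- ===== SOURCE A (Python) =====
-- def match(c1, c2):
--     if c1 == c2:
--         return 1
--     return -3
--
-- def count_gaps(s1, s2, d):
--     gaps = 0
--     i, j = len(s1), len(s2)
--     while i > 0 and j > 0:
--         if d[i][j] == d[i-1][j-1] + match(s1[i-1], s2[j-1]):
--             i -= 1
--             j -= 1
--         elif d[i][j] == d[i][j-1] - 1:
--             gaps += 1
--             j -= 1
--         elif d[i][j] == d[i-1][j] - 1:
--             gaps += 1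
--             i -= 1
--     while i > 0:
--         gaps += 1
--         i -= 1
--     while j > 0:
--         gaps += 1
--         j -= 1
--     return gaps
--
-- def maximazing_gap_symbols(s1, s2):
--     n, m = len(s1), len(s2)
--     d = [[0 for _ in range(m+1)] for _ in range(n+1)]
--     for i in range(n+1):
--         d[i][0] = -i
--     for j in range(m+1):
--         d[0][j] = -j
--
--     for i in range(1, n+1):
--         for j in range(1, m+1):
--             d[i][j] = max(d[i-1][j-1] + match(s1[i-1], s2[j-1]),
--                           d[i-1][j] - 1,
--                           d[i][j-1] - 1)
--
--     return count_gaps(s1, s2, d)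
-- ===== SOURCE B (Python) =====
-- def match(c1, c2):
--     if c1 == c2:
--         return 1
--     return -3
--
-- def maximazing_gap_symbols(s1, s2):
--     # single forward pass: carry (score, gap-count-of-traceback-path) per cell
--     n, m = len(s1), len(s2)
--     prev = [(-j, j) for j in range(m + 1)]
--     for i in range(1, n + 1):
--         cur = [(-i, i)]
--         for j in range(1, m + 1):
--             diag, up, left = prev[j - 1], prev[j], cur[j - 1]
--             a = diag[0] + match(s1[i - 1], s2[j - 1])
--             best = max(a, up[0] - 1, left[0] - 1)
--             if best == a:
--                 g = diag[1]
--             elif best == left[0] - 1: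
--                 g = left[1] + 1
--             else:
--                 g = up[1] + 1
--             cur.append((best, g))
--         prev = cur
--     return prev[m][1]
-- ===== Notes on version B (the rewrite author's own statement) =====
-- stated objective: alternative
-- what changed: A fills the full score table and then reconstructs the alignment backwards with a separate traceback loop to count gaps; B makes a single forward pass that keeps only two rows, carrying per cell the pair (score, gap count of the traceback-preferred path) with the same predecessor precedence, and returns the gap count of the last cell directly.
import Mathlib
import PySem

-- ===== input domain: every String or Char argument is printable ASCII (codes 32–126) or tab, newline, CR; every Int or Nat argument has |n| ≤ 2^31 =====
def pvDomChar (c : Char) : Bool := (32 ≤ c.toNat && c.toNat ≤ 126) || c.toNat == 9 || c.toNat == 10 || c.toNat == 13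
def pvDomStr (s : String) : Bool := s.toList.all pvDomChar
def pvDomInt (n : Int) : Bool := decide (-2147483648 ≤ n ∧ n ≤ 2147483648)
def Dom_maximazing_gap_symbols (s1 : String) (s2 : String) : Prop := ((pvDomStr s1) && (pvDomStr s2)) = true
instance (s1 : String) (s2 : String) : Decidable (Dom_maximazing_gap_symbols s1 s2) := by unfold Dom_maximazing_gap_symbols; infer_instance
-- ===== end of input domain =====

-- B replaces A's fill-the-table-then-traceback-backwards scheme by a single forward pass
-- that carries (score, gap count of the traceback-preferred path) per cell (objective: alternative).

-- ===== PORT A =====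
def matchA (c1 c2 : Char) : Int := if c1 == c2 then 1 else -3

-- fill the cells j = 1..m of row i of d, left to right, from the previous row
def goA (c1 : Char) : List Char → Int → List Int → List Int
  | c2 :: crest, left, pdiag :: pup :: prest =>
      let cell := max (max (pdiag + matchA c1 c2) (pup - 1)) (left - 1)
      cell :: goA c1 crest cell (pup :: prest)
  | _, _, _ => []

-- build rows 1..n of the table, each from the previous one
def rowsA (l2 : List Char) : Nat → List Int → List Char → List (List Int)
  | _, _, [] => []
  | i, prev, c :: rest =>
      let r := (-(i + 1 : Int)) :: goA c l2 (-(i + 1 : Int)) prev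
      r :: rowsA l2 (i + 1) r rest

def tableA (l1 l2 : List Char) : List (List Int) :=
  let row0 := (List.range (l2.length + 1)).map (fun j : Nat => -(j : Int))
  row0 :: rowsA l2 0 row0 l1

def getD2 (d : List (List Int)) (i j : Nat) : Int := (d.getD i []).getD j 0

-- count_gaps' traceback loop; fuel = i+j bounds the iterations (each executed branch of
-- the Python 'while' decreases i+j; the no-branch fallback, on which Python would loop
-- forever, never fires for the table A builds)
def cgAux (l1 l2 : List Char) (d : List (List Int)) : Nat → Nat → Nat → Int → Int
  | 0, i, j, gaps => gaps + (i : Int) + (j : Int)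
  | fuel + 1, i, j, gaps =>
      if 0 < i ∧ 0 < j then
        if getD2 d i j = getD2 d (i - 1) (j - 1) + matchA (l1.getD (i - 1) ' ') (l2.getD (j - 1) ' ') then
          cgAux l1 l2 d fuel (i - 1) (j - 1) gaps
        else if getD2 d i j = getD2 d i (j - 1) - 1 then
          cgAux l1 l2 d fuel i (j - 1) (gaps + 1)
        else if getD2 d i j = getD2 d (i - 1) j - 1 then
          cgAux l1 l2 d fuel (i - 1) j (gaps + 1)
        else
          cgAux l1 l2 d fuel i j gaps
      else gaps + (i : Int) + (j : Int)

def maximazing_gap_symbols (s1 : String) (s2 : String) : Int :=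
  cgAux s1.toList s2.toList (tableA s1.toList s2.toList)
    (s1.toList.length + s2.toList.length) s1.toList.length s2.toList.length 0

-- ===== PORT B =====
-- one forward pass per cell carrying (score, gaps), same cell order as Source B
def goB (c1 : Char) : List Char → (Int × Int) → List (Int × Int) → List (Int × Int)
  | c2 :: crest, left, pdiag :: pup :: prest =>
      let a := pdiag.1 + matchA c1 c2
      let best := max (max a (pup.1 - 1)) (left.1 - 1)
      let g := if best = a then pdiag.2
               else if best = left.1 - 1 then left.2 + 1
               else pup.2 + 1
      (best, g) :: goB c1 crest (best, g) (pup :: prest)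
  | _, _, _ => []

def loopB (l2 : List Char) : Nat → List (Int × Int) → List Char → List (Int × Int)
  | _, prev, [] => prev
  | i, prev, c :: rest =>
      let r := (-(i + 1 : Int), (i + 1 : Int)) :: goB c l2 (-(i + 1 : Int), (i + 1 : Int)) prev
      loopB l2 (i + 1) r rest

def maximazing_gap_symbols_alt (s1 : String) (s2 : String) : Int :=
  let l1 := s1.toList
  let l2 := s2.toList
  let row0 := (List.range (l2.length + 1)).map (fun j : Nat => (-(j : Int), (j : Int)))
  ((loopB l2 0 row0 l1).getD l2.length (0, 0)).2

-- ===== PRECONDITION & SPEC =====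
def Spec_maximazing_gap_symbols (s1 : String) (s2 : String) (out : Int) : Prop := out = maximazing_gap_symbols_alt s1 s2
instance (s1 : String) (s2 : String) (out : Int) : Decidable (Spec_maximazing_gap_symbols s1 s2 out) := by unfold Spec_maximazing_gap_symbols; infer_instance

-- ===== CLAIM (what is proved, stated in full; the proofs are below) =====
def Claim_equal_maximazing_gap_symbols : Prop := ∀ (s1 : String) (s2 : String), Dom_maximazing_gap_symbols s1 s2 → Spec_maximazing_gap_symbols s1 s2 (maximazing_gap_symbols s1 s2)

-- ===== LEMMAS AND PROOFS =====

-- the mathematical score table both programs compute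
def Dv (l1 l2 : List Char) : Nat → Nat → Int
  | 0, j => -(j : Int)
  | i + 1, 0 => -(i + 1 : Int)
  | i + 1, j + 1 =>
      max (max (Dv l1 l2 i j + matchA (l1.getD i ' ') (l2.getD j ' ')) (Dv l1 l2 i (j + 1) - 1))
          (Dv l1 l2 (i + 1) j - 1)

-- gap count of the traceback-preferred path to (i, j)
def Gv (l1 l2 : List Char) : Nat → Nat → Int
  | 0, j => (j : Int)
  | i + 1, 0 => (i + 1 : Int)
  | i + 1, j + 1 =>
      if Dv l1 l2 (i + 1) (j + 1) = Dv l1 l2 i j + matchA (l1.getD i ' ') (l2.getD j ' ') then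
        Gv l1 l2 i j
      else if Dv l1 l2 (i + 1) (j + 1) = Dv l1 l2 (i + 1) j - 1 then
        Gv l1 l2 (i + 1) j + 1
      else
        Gv l1 l2 i (j + 1) + 1

theorem drop_head (l1 : List Char) (i : Nat) (c : Char) (rest : List Char)
    (h : c :: rest = l1.drop i) : i < l1.length ∧ l1.getD i ' ' = c ∧ rest = l1.drop (i + 1) := by
  have hjl : i < l1.length := by
    by_contra hc
    have : l1.drop i = [] := List.drop_eq_nil_iff.mpr (by omega)
    rw [this] at h; exact List.cons_ne_nil _ _ h
  have hget : l1[i]? = some c := by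
    have : (l1.drop i)[0]? = some c := by rw [← h]; rfl
    simpa using this
  exact ⟨hjl, by simp [List.getD, hget], by
    have := congrArg (List.drop 1) h
    simpa [List.drop_drop] using this⟩

theorem goA_eq (l1 l2 : List Char) (i : Nat) :
    ∀ (t : List Char) (j : Nat), t = l2.drop j →
    goA (l1.getD i ' ') t (Dv l1 l2 (i + 1) j)
        ((List.range' j (l2.length + 1 - j)).map (Dv l1 l2 i)) =
    (List.range' (j + 1) (l2.length - j)).map (Dv l1 l2 (i + 1)) := by
  intro t
  induction t with
  | nil =>
    intro j h
    have hj : l2.length ≤ j := by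
      have := List.drop_eq_nil_iff.mp h.symm
      omega
    have : l2.length - j = 0 := by omega
    simp [goA, this]
  | cons c2 crest ih =>
    intro j h
    obtain ⟨hjl, hc2, hcrest⟩ := drop_head l2 j c2 crest h
    obtain ⟨k, hk⟩ : ∃ k, l2.length - j = k + 1 := ⟨l2.length - j - 1, by omega⟩
    have h1 : l2.length + 1 - j = k + 2 := by omega
    have h2 : l2.length + 1 - (j + 1) = k + 1 := by omega
    have h3 : l2.length - (j + 1) = k := by omega
    rw [h1, hk]
    rw [List.range'_succ, List.range'_succ, List.map_cons, List.map_cons]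
    show goA (l1.getD i ' ') (c2 :: crest) (Dv l1 l2 (i+1) j)
        (Dv l1 l2 i j :: Dv l1 l2 i (j+1) :: (List.range' (j+2) k).map (Dv l1 l2 i)) = _
    rw [goA]
    have hcell : max (max (Dv l1 l2 i j + matchA (l1.getD i ' ') c2) (Dv l1 l2 i (j+1) - 1))
        (Dv l1 l2 (i+1) j - 1) = Dv l1 l2 (i+1) (j+1) := by
      rw [Dv, hc2]
    have ihh := ih (j + 1) hcrest
    rw [h2, h3, List.range'_succ, List.map_cons] at ihh
    simp only [hcell, List.map_cons]
    exact congrArg (List.cons _) ihh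

theorem goB_eq (l1 l2 : List Char) (i : Nat) :
    ∀ (t : List Char) (j : Nat), t = l2.drop j →
    goB (l1.getD i ' ') t (Dv l1 l2 (i + 1) j, Gv l1 l2 (i + 1) j)
        ((List.range' j (l2.length + 1 - j)).map (fun k => (Dv l1 l2 i k, Gv l1 l2 i k))) =
    (List.range' (j + 1) (l2.length - j)).map (fun k => (Dv l1 l2 (i + 1) k, Gv l1 l2 (i + 1) k)) := by
  intro t
  induction t with
  | nil =>
    intro j h
    have hj : l2.length ≤ j := by
      have := List.drop_eq_nil_iff.mp h.symm
      omega
    have : l2.length - j = 0 := by omega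
    simp [goB, this]
  | cons c2 crest ih =>
    intro j h
    obtain ⟨hjl, hc2, hcrest⟩ := drop_head l2 j c2 crest h
    obtain ⟨k, hk⟩ : ∃ k, l2.length - j = k + 1 := ⟨l2.length - j - 1, by omega⟩
    have h1 : l2.length + 1 - j = k + 2 := by omega
    have h2 : l2.length + 1 - (j + 1) = k + 1 := by omega
    have h3 : l2.length - (j + 1) = k := by omega
    rw [h1, hk]
    rw [List.range'_succ, List.range'_succ, List.map_cons, List.map_cons]
    show goB (l1.getD i ' ') (c2 :: crest) (Dv l1 l2 (i+1) j, Gv l1 l2 (i+1) j)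
        ((Dv l1 l2 i j, Gv l1 l2 i j) :: (Dv l1 l2 i (j+1), Gv l1 l2 i (j+1)) ::
          (List.range' (j+2) k).map (fun k => (Dv l1 l2 i k, Gv l1 l2 i k))) = _
    rw [goB]
    have hcell : max (max (Dv l1 l2 i j + matchA (l1.getD i ' ') c2) (Dv l1 l2 i (j+1) - 1))
        (Dv l1 l2 (i+1) j - 1) = Dv l1 l2 (i+1) (j+1) := by
      rw [Dv, hc2]
    have hg : (if Dv l1 l2 (i+1) (j+1) = Dv l1 l2 i j + matchA (l1.getD i ' ') c2 then Gv l1 l2 i j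
               else if Dv l1 l2 (i+1) (j+1) = Dv l1 l2 (i+1) j - 1 then Gv l1 l2 (i+1) j + 1
               else Gv l1 l2 i (j+1) + 1) = Gv l1 l2 (i+1) (j+1) := by
      rw [Gv, hc2]
    have ihh := ih (j + 1) hcrest
    rw [h2, h3, List.range'_succ, List.map_cons] at ihh
    simp only [hcell, hg, List.map_cons]
    exact congrArg (List.cons _) ihh

theorem row_succ (l1 l2 : List Char) (i : Nat) (c : Char) (hc : l1.getD i ' ' = c) :
    (-(i + 1 : Int)) :: goA c l2 (-(i + 1 : Int)) ((List.range (l2.length + 1)).map (Dv l1 l2 i)) =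
    (List.range (l2.length + 1)).map (Dv l1 l2 (i + 1)) := by
  have h0 : (-(i + 1 : Int)) = Dv l1 l2 (i + 1) 0 := by rw [Dv]
  have := goA_eq l1 l2 i l2 0 rfl
  simp only [Nat.sub_zero] at this
  rw [List.range_eq_range'] at *
  rw [hc] at this
  rw [h0]
  conv_rhs => rw [List.range'_succ, List.map_cons]
  exact congrArg (List.cons _) this

theorem rowsA_eq (l1 l2 : List Char) :
    ∀ (t : List Char) (i : Nat), t = l1.drop i →
    rowsA l2 i ((List.range (l2.length + 1)).map (Dv l1 l2 i)) t =
    (List.range' (i + 1) (l1.length - i)).map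
      (fun k => (List.range (l2.length + 1)).map (Dv l1 l2 k)) := by
  intro t
  induction t with
  | nil =>
    intro i h
    have : l1.length - i = 0 := by
      have := List.drop_eq_nil_iff.mp h.symm; omega
    simp [rowsA, this]
  | cons c rest ih =>
    intro i h
    obtain ⟨hi, hc, hrest⟩ := drop_head l1 i c rest h
    obtain ⟨k, hk⟩ : ∃ k, l1.length - i = k + 1 := ⟨l1.length - i - 1, by omega⟩
    have h3 : l1.length - (i + 1) = k := by omega
    rw [hk, List.range'_succ, List.map_cons]
    rw [rowsA]
    simp only [row_succ l1 l2 i c hc]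
    have ihh := ih (i + 1) hrest
    rw [h3] at ihh
    exact congrArg (List.cons _) ihh

theorem tableA_eq (l1 l2 : List Char) :
    tableA l1 l2 = (List.range (l1.length + 1)).map
      (fun k => (List.range (l2.length + 1)).map (Dv l1 l2 k)) := by
  have h0 : (List.range (l2.length + 1)).map (fun j : Nat => -(j : Int)) =
      (List.range (l2.length + 1)).map (Dv l1 l2 0) := by
    apply List.map_congr_left; intro j _; rw [Dv]
  rw [tableA]
  simp only [h0]
  rw [rowsA_eq l1 l2 l1 0 rfl]
  rw [show List.range (l1.length + 1) = 0 :: List.range' 1 l1.length from by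
    rw [List.range_eq_range', List.range'_succ]]
  rw [List.map_cons]
  rfl

theorem tableA_get (l1 l2 : List Char) (i j : Nat) (hi : i ≤ l1.length) (hj : j ≤ l2.length) :
    getD2 (tableA l1 l2) i j = Dv l1 l2 i j := by
  rw [getD2, tableA_eq]
  have h1 : ((List.range (l1.length + 1)).map
      (fun k => (List.range (l2.length + 1)).map (Dv l1 l2 k))).getD i []
      = (List.range (l2.length + 1)).map (Dv l1 l2 i) := by
    rw [List.getD_eq_getElem?_getD, List.getElem?_map, List.getElem?_range (by omega)]
    rfl
  rw [h1, List.getD_eq_getElem?_getD, List.getElem?_map, List.getElem?_range (by omega)]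
  rfl

theorem rowB_succ (l1 l2 : List Char) (i : Nat) (c : Char) (hc : l1.getD i ' ' = c) :
    (-(i + 1 : Int), (i + 1 : Int)) :: goB c l2 (-(i + 1 : Int), (i + 1 : Int))
        ((List.range (l2.length + 1)).map (fun j => (Dv l1 l2 i j, Gv l1 l2 i j))) =
    (List.range (l2.length + 1)).map (fun j => (Dv l1 l2 (i + 1) j, Gv l1 l2 (i + 1) j)) := by
  have h0 : ((-(i + 1 : Int), (i + 1 : Int)) : Int × Int) = (Dv l1 l2 (i + 1) 0, Gv l1 l2 (i + 1) 0) := by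
    rw [Dv, Gv]
  have := goB_eq l1 l2 i l2 0 rfl
  simp only [Nat.sub_zero] at this
  rw [List.range_eq_range'] at *
  rw [hc] at this
  rw [h0]
  conv_rhs => rw [List.range'_succ, List.map_cons]
  exact congrArg (List.cons _) this

theorem loopB_eq (l1 l2 : List Char) :
    ∀ (t : List Char) (i : Nat), i ≤ l1.length → t = l1.drop i →
    loopB l2 i ((List.range (l2.length + 1)).map (fun j => (Dv l1 l2 i j, Gv l1 l2 i j))) t =
    (List.range (l2.length + 1)).map (fun j => (Dv l1 l2 l1.length j, Gv l1 l2 l1.length j)) := by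
  intro t
  induction t with
  | nil =>
    intro i hle h
    have : l1.length ≤ i := by
      have := List.drop_eq_nil_iff.mp h.symm; omega
    have hlen : i = l1.length := by omega
    rw [loopB, hlen]
  | cons c rest ih =>
    intro i hle h
    obtain ⟨hi, hc, hrest⟩ := drop_head l1 i c rest h
    rw [loopB]
    simp only [rowB_succ l1 l2 i c hc]
    exact ih (i + 1) (by omega) hrest

theorem alt_eq (s1 s2 : String) :
    maximazing_gap_symbols_alt s1 s2 = Gv s1.toList s2.toList s1.toList.length s2.toList.length := by
  unfold maximazing_gap_symbols_alt
  have h0 : (List.range (s2.toList.length + 1)).map (fun j : Nat => (-(j : Int), (j : Int))) =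
      (List.range (s2.toList.length + 1)).map
        (fun j => (Dv s1.toList s2.toList 0 j, Gv s1.toList s2.toList 0 j)) := by
    apply List.map_congr_left; intro j _; rw [Dv, Gv]
  simp only [h0]
  rw [loopB_eq s1.toList s2.toList s1.toList 0 (by omega) rfl]
  rw [List.getD_eq_getElem?_getD, List.getElem?_map, List.getElem?_range (by omega)]
  rfl

theorem cgAux_eq (l1 l2 : List Char) :
    ∀ (fuel i j : Nat) (gaps : Int), i ≤ l1.length → j ≤ l2.length → i + j ≤ fuel →
    cgAux l1 l2 (tableA l1 l2) fuel i j gaps = gaps + Gv l1 l2 i j := by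
  intro fuel
  induction fuel with
  | zero =>
    intro i j gaps hi hj hf
    obtain ⟨rfl, rfl⟩ : i = 0 ∧ j = 0 := by omega
    rw [cgAux, Gv]
    simp
  | succ fuel ih =>
    intro i j gaps hi hj hf
    match i, j with
    | 0, j =>
      rw [cgAux, Gv]
      simp
    | i + 1, 0 =>
      rw [cgAux, Gv]
      simp
    | i + 1, j + 1 =>
      rw [cgAux, if_pos ⟨Nat.succ_pos i, Nat.succ_pos j⟩]
      simp only [Nat.add_sub_cancel]
      rw [tableA_get l1 l2 (i + 1) (j + 1) hi hj,
          tableA_get l1 l2 i j (by omega) (by omega),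
          tableA_get l1 l2 (i + 1) j hi (by omega),
          tableA_get l1 l2 i (j + 1) (by omega) hj]
      split_ifs with h1 h2 h3
      · rw [ih i j gaps (by omega) (by omega) (by omega)]
        conv_rhs => rw [Gv]
        rw [if_pos h1]
      · rw [ih (i + 1) j (gaps + 1) hi (by omega) (by omega)]
        conv_rhs => rw [Gv]
        rw [if_neg h1, if_pos h2]
        ring
      · rw [ih i (j + 1) (gaps + 1) (by omega) hj (by omega)]
        conv_rhs => rw [Gv]
        rw [if_neg h1, if_neg h2]
        ring
      · exfalso
        have hm : Dv l1 l2 (i + 1) (j + 1) =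
            max (max (Dv l1 l2 i j + matchA (l1.getD i ' ') (l2.getD j ' '))
              (Dv l1 l2 i (j + 1) - 1)) (Dv l1 l2 (i + 1) j - 1) := by rw [Dv]
        rcases max_choice (max (Dv l1 l2 i j + matchA (l1.getD i ' ') (l2.getD j ' '))
            (Dv l1 l2 i (j + 1) - 1)) (Dv l1 l2 (i + 1) j - 1) with hmx | hmx
        · rcases max_choice (Dv l1 l2 i j + matchA (l1.getD i ' ') (l2.getD j ' '))
              (Dv l1 l2 i (j + 1) - 1) with hmy | hmy
          · exact h1 (by rw [hm, hmx, hmy])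
          · exact h3 (by rw [hm, hmx, hmy])
        · exact h2 (by rw [hm, hmx])

-- ===== VERDICT (by name: the statement is the Claim_ definition above) =====
theorem maximazing_gap_symbols_spec : Claim_equal_maximazing_gap_symbols := by
  intro s1 s2 _
  unfold Spec_maximazing_gap_symbols maximazing_gap_symbols
  rw [alt_eq, cgAux_eq s1.toList s2.toList (s1.toList.length + s2.toList.length)
    s1.toList.length s2.toList.length 0 le_rfl le_rfl le_rfl]
  ring
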